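-- pv_equiv track=rewrite | github.com/ClFeSc/OrderDependencyTester | scripts/validate-list-based-candidates.py | create_sort_args
-- ===== SOURCE A (Python) =====
-- def create_sort_args(columns, direction):
--     sort_cols = []
--     sort_directions = []
--     for col, dir in zip(columns, direction):
--         sort_cols.append(col + "_isna")
--         sort_directions.append(True)
--         sort_cols.append(col)
--         sort_directions.append(dir)
--     return sort_cols, sort_directions
-- ===== SOURCE B (Python) =====
-- def create_sort_args(columns, direction):
--     # Divide and conquer: build the interleaved results for an index range by
--     # splitting it in half, recursing, and concatenating the two halves.
--     n = min(len(columns), len(direction))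
--
--     def build(lo, hi):
--         if hi <= lo:
--             return [], []
--         if hi - lo == 1:
--             col, dir = columns[lo], direction[lo]
--             return [col + "_isna", col], [True, dir]
--         mid = (lo + hi) // 2
--         lc, ld = build(lo, mid)
--         rc, rd = build(mid, hi)
--         return lc + rc, ld + rd
--
--     return build(0, n)
-- ===== Notes on version B (the rewrite author's own statement) =====
-- stated objective: alternative
-- what changed: B replaces A's single left-to-right pass appending to two parallel accumulators by a divide-and-conquer recursion on index ranges: it splits the range in half, builds each half recursively, and concatenates the halves' results.
import Mathlib
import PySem

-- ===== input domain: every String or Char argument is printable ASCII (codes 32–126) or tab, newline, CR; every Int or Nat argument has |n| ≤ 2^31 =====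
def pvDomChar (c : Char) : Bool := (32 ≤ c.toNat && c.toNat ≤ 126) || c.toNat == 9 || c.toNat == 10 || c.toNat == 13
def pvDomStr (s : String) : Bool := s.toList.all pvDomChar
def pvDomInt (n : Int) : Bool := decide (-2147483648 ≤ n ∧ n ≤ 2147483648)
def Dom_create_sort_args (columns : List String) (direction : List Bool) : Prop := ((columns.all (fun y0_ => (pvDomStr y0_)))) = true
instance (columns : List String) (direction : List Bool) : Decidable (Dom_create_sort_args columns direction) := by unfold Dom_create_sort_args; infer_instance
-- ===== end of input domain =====

-- B replaces A's left-to-right two-accumulator loop by a divide-and-conquer recursion on index ranges (alternative algorithm; return value only).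

-- ===== PORT A =====
-- loop over zip(columns, direction), appending to the two accumulator lists
def create_sort_args (columns : List String) (direction : List Bool) : List String × List Bool :=
  (List.zip columns direction).foldl
    (fun (s : List String × List Bool) cd =>
      (s.1 ++ [cd.1 ++ "_isna", cd.1], s.2 ++ [true, cd.2]))
    ([], [])

-- ===== PORT B =====
-- divide and conquer on the index range [lo, hi): split at the midpoint, recurse, concatenate
def pvBuild (columns : List String) (direction : List Bool) (lo hi : Nat) : List String × List Bool :=
  if _h1 : hi ≤ lo then ([], [])
  else if _h2 : hi - lo = 1 then
    ([columns.getD lo "" ++ "_isna", columns.getD lo ""], [true, direction.getD lo false])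
  else
    let mid := (lo + hi) / 2
    let l := pvBuild columns direction lo mid
    let r := pvBuild columns direction mid hi
    (l.1 ++ r.1, l.2 ++ r.2)
termination_by hi - lo
decreasing_by all_goals omega

def create_sort_args_alt (columns : List String) (direction : List Bool) : List String × List Bool :=
  pvBuild columns direction 0 (min columns.length direction.length)

-- ===== PRECONDITION & SPEC =====
def Spec_create_sort_args (columns : List String) (direction : List Bool) (out : List String × List Bool) : Prop := out = create_sort_args_alt columns direction
instance (columns : List String) (direction : List Bool) (out : List String × List Bool) : Decidable (Spec_create_sort_args columns direction out) := by unfold Spec_create_sort_args; infer_instance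

-- ===== CLAIM (what is proved, stated in full; the proofs are below) =====
def Claim_equal_create_sort_args : Prop := ∀ (columns : List String) (direction : List Bool), Dom_create_sort_args columns direction → Spec_create_sort_args columns direction (create_sort_args columns direction)

-- ===== LEMMAS AND PROOFS =====

-- g: the interleaved pair of lists generated by a segment of zipped input (proof helper).
def pvSeg (l : List (String × Bool)) : List String × List Bool :=
  (l.flatMap (fun cd => [cd.1 ++ "_isna", cd.1]), l.flatMap (fun cd => [true, cd.2]))

-- A's foldl with accumulator (a, b) appends the segment output of the whole zip.
theorem create_sort_args_foldl (l : List (String × Bool)) (a : List String) (b : List Bool) :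
    l.foldl
      (fun (s : List String × List Bool) cd =>
        (s.1 ++ [cd.1 ++ "_isna", cd.1], s.2 ++ [true, cd.2])) (a, b)
    = (a ++ (pvSeg l).1, b ++ (pvSeg l).2) := by
  induction l generalizing a b with
  | nil => simp [pvSeg]
  | cons cd t ih => simp [pvSeg, ih]

-- B's divide and conquer on [lo, hi) produces the segment output of that slice of the zip.
theorem pvBuild_eq_seg (columns : List String) (direction : List Bool) (lo hi : Nat) :
    hi ≤ (List.zip columns direction).length →
    pvBuild columns direction lo hi
      = pvSeg (((List.zip columns direction).drop lo).take (hi - lo)) := by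
  induction lo, hi using pvBuild.induct columns direction with
  | case1 lo hi h1 =>
    intro _
    have : hi - lo = 0 := by omega
    simp [pvBuild, h1, this, pvSeg]
  | case2 lo hi h1 h2 =>
    intro hhi
    have hlo : lo < (List.zip columns direction).length := by omega
    have hc : lo < columns.length := by
      have := List.length_zip (l₁ := columns) (l₂ := direction); omega
    have hd : lo < direction.length := by
      have := List.length_zip (l₁ := columns) (l₂ := direction); omega
    have hdrop : ((List.zip columns direction).drop lo).take (hi - lo)
        = [(columns[lo], direction[lo])] := by
      rw [h2]
      rw [List.drop_eq_getElem_cons hlo]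
      simp [List.getElem_zip]
    rw [hdrop]
    rw [pvBuild]
    simp [h1, h2, pvSeg, List.getD_eq_getElem?_getD, List.getElem?_eq_getElem hc,
      List.getElem?_eq_getElem hd]
  | case3 lo hi h1 h2 mid ihl ihr =>
    intro hhi
    have hmid1 : lo ≤ mid := by omega
    have hmid2 : mid ≤ hi := by omega
    have hsplit : ((List.zip columns direction).drop lo).take (hi - lo)
        = ((List.zip columns direction).drop lo).take (mid - lo)
          ++ ((List.zip columns direction).drop mid).take (hi - mid) := by
      have harith : hi - lo = (mid - lo) + (hi - mid) := by omega
      rw [harith, List.take_add]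
      congr 2
      rw [List.drop_drop]
      congr 1
      omega
    rw [pvBuild]
    rw [dif_neg h1, dif_neg h2]
    show ((pvBuild columns direction lo mid).1 ++ (pvBuild columns direction mid hi).1,
          (pvBuild columns direction lo mid).2 ++ (pvBuild columns direction mid hi).2)
        = pvSeg (((List.zip columns direction).drop lo).take (hi - lo))
    rw [ihl (by omega), ihr hhi, hsplit]
    simp [pvSeg]

-- ===== VERDICT (by name: the statement is the Claim_ definition above) =====
theorem create_sort_args_spec : Claim_equal_create_sort_args := by
  intro columns direction _
  unfold Spec_create_sort_args create_sort_args create_sort_args_alt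
  rw [create_sort_args_foldl]
  rw [pvBuild_eq_seg columns direction 0 _ (by simp)]
  simp [List.take_of_length_le (by simp : (List.zip columns direction).length ≤ min columns.length direction.length)]
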